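-- pv_equiv track=rewrite | github.com/SecureworldProject/CIPHER_HASH_RISTRAS_TEST | fun_boolean.py | grado_FNA
-- ===== SOURCE A (Python) =====
-- def grado_FNA(cadena:str) -> int:
-- 	""" Esta funcion te devuelve el grado algebraico de una funcion booleana se interpreta al reves, el x4 (o el mas alto) es x0 en la funcion real"""
-- 	cadena_separada = cadena.split("^")
-- 	num_terms = 0
-- 	for i in cadena_separada:
-- 		num_terms_aux = i.count("x")
-- 		if num_terms_aux > num_terms:
-- 			num_terms = num_terms_aux
-- 	return num_terms
-- ===== SOURCE B (Python) =====
-- def grado_FNA(cadena: str) -> int: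
--     """Streaming pass over the characters: reset a counter at '^', count 'x', track the best."""
--     best = 0
--     cur = 0
--     for c in cadena:
--         if c == '^':
--             cur = 0
--         elif c == 'x':
--             cur += 1
--             if cur > best:
--                 best = cur
--     return best
-- ===== Notes on version B (the rewrite author's own statement) =====
-- stated objective: alternative
-- what changed: Replaces split-on-'^'-then-count-'x'-per-term with a single streaming character scan that resets a counter at each '^' and tracks the running maximum, never materializing the list of terms.
import Mathlib
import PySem

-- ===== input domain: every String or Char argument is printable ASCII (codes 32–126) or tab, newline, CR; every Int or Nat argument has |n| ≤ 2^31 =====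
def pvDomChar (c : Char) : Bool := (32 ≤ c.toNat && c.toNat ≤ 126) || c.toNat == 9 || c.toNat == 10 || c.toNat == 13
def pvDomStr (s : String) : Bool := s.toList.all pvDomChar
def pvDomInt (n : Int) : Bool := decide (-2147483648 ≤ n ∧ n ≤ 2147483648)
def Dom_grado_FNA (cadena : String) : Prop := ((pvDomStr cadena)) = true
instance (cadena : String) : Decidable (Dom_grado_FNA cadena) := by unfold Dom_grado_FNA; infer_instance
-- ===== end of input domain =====

-- B replaces split-then-count-per-term by a single streaming character scan (alternative decomposition, same cost).


-- ===== PORT A =====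
-- cadena.split("^"); then fold: num_terms_aux = i.count("x"); if num_terms_aux > num_terms: num_terms = num_terms_aux
def grado_FNA (cadena : String) : Int :=
  match PySem.Str.split? cadena "^" with
  | none => 0   -- unreachable: the separator "^" is nonempty (totality guard only)
  | some cadena_separada =>
    cadena_separada.foldl
      (fun num_terms i =>
        let num_terms_aux : Int := (PySem.Str.count i "x" : Int)
        if num_terms_aux > num_terms then num_terms_aux else num_terms) 0

-- ===== PORT B =====
-- one pass over the characters: reset cur at '^', count 'x', keep the best
def grado_FNA_alt (cadena : String) : Int :=
  (cadena.toList.foldl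
    (fun st c =>
      if c = '^' then (0, st.2)
      else if c = 'x' then
        (st.1 + 1, if st.1 + 1 > st.2 then st.1 + 1 else st.2)
      else st)
    ((0 : Int), (0 : Int))).2

-- ===== PRECONDITION & SPEC =====
def Spec_grado_FNA (cadena : String) (out : Int) : Prop := out = grado_FNA_alt cadena
instance (cadena : String) (out : Int) : Decidable (Spec_grado_FNA cadena out) := by unfold Spec_grado_FNA; infer_instance

-- ===== CLAIM (what is proved, stated in full; the proofs are below) =====
def Claim_equal_grado_FNA : Prop := ∀ (cadena : String), Dom_grado_FNA cadena → Spec_grado_FNA cadena (grado_FNA cadena)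

-- ===== LEMMAS AND PROOFS =====

/-- Reference splitter: split `l` on '^', with `pre` the partial current piece. -/
def pvSplitCh (pre : List Char) : List Char → List (List Char)
  | [] => [pre]
  | c :: rest => if c = '^' then pre :: pvSplitCh [] rest else pvSplitCh (pre ++ [c]) rest

theorem pv_count_go (fuel : Nat) (l : List Char) (acc : Nat) (h : l.length ≤ fuel) :
    PySem.Chars.count.go ['x'] fuel l acc = acc + l.count 'x' := by
  induction fuel generalizing l acc with
  | zero => cases l with
    | nil => simp [PySem.Chars.count.go]
    | cons c t => simp at h
  | succ n ih =>
    cases l with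
    | nil => simp [PySem.Chars.count.go]
    | cons c t =>
      simp only [List.length_cons] at h
      by_cases hc : c = 'x'
      · subst hc
        rw [show PySem.Chars.count.go ['x'] (n+1) ('x' :: t) acc
              = PySem.Chars.count.go ['x'] n t (acc + 1) by
            simp [PySem.Chars.count.go, List.isPrefixOf]]
        rw [ih t (acc + 1) (by omega)]
        simp [List.count_cons]
        omega
      · rw [show PySem.Chars.count.go ['x'] (n+1) (c :: t) acc
              = PySem.Chars.count.go ['x'] n t acc by
            simp [PySem.Chars.count.go, List.isPrefixOf]
            exact fun h => absurd h.symm hc]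
        rw [ih t acc (by omega)]
        simp [List.count_cons, hc]

theorem pv_count_x (l : List Char) : PySem.Chars.count l ['x'] = l.count 'x' := by
  have := pv_count_go l.length l 0 le_rfl
  simp [PySem.Chars.count, this]

theorem pv_splitOn_go (fuel : Nat) (l cur : List Char) (acc : List (List Char))
    (h : l.length < fuel) :
    PySem.Chars.splitOn.go ['^'] fuel l cur acc = acc.reverse ++ pvSplitCh cur.reverse l := by
  induction fuel generalizing l cur acc with
  | zero => omega
  | succ n ih =>
    cases l with
    | nil => simp [PySem.Chars.splitOn.go, pvSplitCh]
    | cons c t =>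
      simp only [List.length_cons] at h
      by_cases hc : c = '^'
      · subst hc
        rw [show PySem.Chars.splitOn.go ['^'] (n+1) ('^' :: t) cur acc
              = PySem.Chars.splitOn.go ['^'] n t [] (cur.reverse :: acc) by
            simp [PySem.Chars.splitOn.go, List.isPrefixOf]]
        rw [ih t [] (cur.reverse :: acc) (by omega)]
        simp [pvSplitCh]
      · rw [show PySem.Chars.splitOn.go ['^'] (n+1) (c :: t) cur acc
              = PySem.Chars.splitOn.go ['^'] n t (c :: cur) acc by
            simp [PySem.Chars.splitOn.go, List.isPrefixOf]
            exact fun h => absurd h.symm hc]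
        rw [ih t (c :: cur) acc (by omega)]
        simp [pvSplitCh, hc]

theorem pv_splitOn_eq (l : List Char) :
    PySem.Chars.splitOn l ['^'] = pvSplitCh [] l := by
  rw [PySem.Chars.splitOn, pv_splitOn_go (l.length + 1) l [] [] (by omega)]
  simp

/-- init-peeling for the max-fold on the A side -/
theorem pv_fold_peel (L : List (List Char)) (b x : Int) :
    L.foldl (fun n seg => if ((seg.count 'x' : Int)) > n then ((seg.count 'x' : Int)) else n) (max b x)
      = max x (L.foldl (fun n seg => if ((seg.count 'x' : Int)) > n then ((seg.count 'x' : Int)) else n) b) := by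
  induction L generalizing b x with
  | nil => simp [max_comm]
  | cons s L ih =>
    simp only [List.foldl_cons]
    have h1 : (if ((s.count 'x' : Int)) > max b x then ((s.count 'x' : Int)) else max b x)
        = max (if ((s.count 'x' : Int)) > b then ((s.count 'x' : Int)) else b) x := by
      split_ifs <;> omega
    rw [h1, ih]

/-- the fold's result dominates `max (pre.count 'x') b` -/
theorem pv_fold_ge (l : List Char) (pre : List Char) (b : Int) :
    max ((pre.count 'x' : Int)) b ≤ (pvSplitCh pre l).foldl
      (fun n seg => if ((seg.count 'x' : Int)) > n then ((seg.count 'x' : Int)) else n) b := by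
  induction l generalizing pre b with
  | nil => simp [pvSplitCh]; omega
  | cons c t ih =>
    by_cases hc : c = '^'
    · subst hc
      simp only [pvSplitCh, List.foldl_cons, Char.reduceEq, reduceIte]
      have := ih [] (if ((pre.count 'x' : Int)) > b then ((pre.count 'x' : Int)) else b)
      simp at this ⊢
      omega
    · simp only [pvSplitCh, if_neg hc]
      have := ih (pre ++ [c]) b
      have hcnt : ((pre ++ [c]).count 'x' : Int) = (pre.count 'x' : Int) + (if c = 'x' then 1 else 0) := by
        by_cases h : c = 'x' <;> simp [List.count_append, h]
      rw [hcnt] at this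
      split_ifs at this <;> omega

/-- main invariant: the streaming fold equals the per-segment max fold -/
theorem pv_main (l : List Char) (pre : List Char) (best : Int)
    (h : ((pre.count 'x' : Int)) ≤ best) :
    (l.foldl (fun st c =>
        if c = '^' then (0, st.2)
        else if c = 'x' then (st.1 + 1, if st.1 + 1 > st.2 then st.1 + 1 else st.2)
        else st) (((pre.count 'x' : Int)), best)).2
      = (pvSplitCh pre l).foldl
          (fun n seg => if ((seg.count 'x' : Int)) > n then ((seg.count 'x' : Int)) else n) best := by
  induction l generalizing pre best with
  | nil =>
    simp [pvSplitCh]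
    omega
  | cons c t ih =>
    by_cases hc : c = '^'
    · subst hc
      simp only [pvSplitCh, List.foldl_cons, Char.reduceEq, reduceIte]
      have h0 : (if ((pre.count 'x' : Int)) > best then ((pre.count 'x' : Int)) else best) = best := by omega
      rw [h0]
      have := ih ([] : List Char) best (by simp; omega)
      simpa using this
    · by_cases hx : c = 'x'
      · subst hx
        have hne : ('x' : Char) ≠ '^' := by decide
        simp only [pvSplitCh, List.foldl_cons, Char.reduceEq, reduceIte]
        have hcnt : ((pre ++ ['x']).count 'x' : Int) = (pre.count 'x' : Int) + 1 := by
          simp [List.count_append]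
        have hb : ((pre ++ ['x']).count 'x' : Int)
            ≤ (if ((pre.count 'x' : Int)) + 1 > best then ((pre.count 'x' : Int)) + 1 else best) := by
          rw [hcnt]; omega
        have := ih (pre ++ ['x'])
          (if ((pre.count 'x' : Int)) + 1 > best then ((pre.count 'x' : Int)) + 1 else best) hb
        rw [hcnt] at this
        rw [this]
        have hmax : (if ((pre.count 'x' : Int)) + 1 > best then ((pre.count 'x' : Int)) + 1 else best)
            = max best ((pre.count 'x' : Int) + 1) := by omega
        rw [hmax, pv_fold_peel]
        have := pv_fold_ge t (pre ++ ['x']) best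
        rw [hcnt] at this
        omega
      · simp only [pvSplitCh, if_neg hc, List.foldl_cons, if_neg hc, if_neg hx]
        have hcnt : ((pre ++ [c]).count 'x' : Int) = (pre.count 'x' : Int) := by
          simp [List.count_append, List.count_singleton, hx]
        have := ih (pre ++ [c]) best (by rw [hcnt]; exact h)
        rw [hcnt] at this
        exact this

-- ===== VERDICT (by name: the statement is the Claim_ definition above) =====
theorem grado_FNA_spec : Claim_equal_grado_FNA := by
  intro cadena _
  unfold Spec_grado_FNA grado_FNA grado_FNA_alt
  have hsep : PySem.Str.split? cadena "^" = some ((PySem.Chars.splitOn cadena.toList ['^']).map String.ofList) := by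
    simp [PySem.Str.split?, PySem.Chars.split?]
  rw [hsep]
  rw [pv_splitOn_eq]
  simp only []
  have hA : ∀ (L : List (List Char)) (b : Int),
      (L.map String.ofList).foldl
        (fun num_terms i =>
          let num_terms_aux : Int := (PySem.Str.count i "x" : Int)
          if num_terms_aux > num_terms then num_terms_aux else num_terms) b
      = L.foldl (fun n seg => if ((seg.count 'x' : Int)) > n then ((seg.count 'x' : Int)) else n) b := by
    intro L
    induction L with
    | nil => intro b; rfl
    | cons s L ih =>
      intro b
      simp only [List.map_cons, List.foldl_cons, ih]
      congr 1
      simp [PySem.Str.count, pv_count_x]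
  rw [hA]
  have := pv_main cadena.toList [] 0 (by simp)
  simpa using this.symm
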